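-- pv_equiv track=rewrite | github.com/zapabob/SO8T | scripts/agents/domain_knowledge_integrator.py | _generate_integrated_context
-- ===== SOURCE A (Python) =====
-- from typing import Dict, List, Optional, Tuple
--
-- def _generate_integrated_context(results: List[Dict], max_length: int = 2000) -> str:
--     """
--     統合コンテキストを生成
--
--     Args:
--         results: 知識エントリのリスト
--         max_length: 最大長
--
--     Returns:
--         統合コンテキストテキスト
--     """
--     context_parts = []
--     current_length = 0
--
--     for result in results:
--         content = result.get('content', '')
--         domain = result.get('domain', 'unknown')
--         source = result.get('source', 'unknown')
--
--         # コンテキスト部分を生成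
--         context_part = f"[{domain.upper()}] {content[:300]}"
--
--         if current_length + len(context_part) > max_length:
--             break
--
--         context_parts.append(context_part)
--         current_length += len(context_part)
--
--     return "\n\n".join(context_parts)
-- ===== SOURCE B (Python) =====
-- from typing import Dict, List
--
-- def _generate_integrated_context(results: List[Dict], max_length: int = 2000) -> str:
--     # Build all context parts, then their prefix-length sums; since part lengths are
--     # nonnegative the sums are nondecreasing, so the largest prefix that fits the
--     # budget can be found by BINARY SEARCH on the prefix sums instead of a greedy scan.
--     parts = [f"[{r.get('domain', 'unknown').upper()}] {r.get('content', '')[:300]}"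
--              for r in results]
--     sums = [0]
--     for p in parts:
--         sums.append(sums[-1] + len(p))
--     # largest k with sums[k] <= max_length (k = 0 always allowed)
--     lo, hi = 0, len(parts)
--     while lo < hi:
--         mid = (lo + hi + 1) // 2
--         if sums[mid] <= max_length:
--             lo = mid
--         else:
--             hi = mid - 1
--     return "\n\n".join(parts[:lo])
-- ===== Notes on version B (the rewrite author's own statement) =====
-- stated objective: alternative
-- what changed: Replaces A's greedy accumulate-and-break loop by building all parts and their prefix-length sums, then binary-searching the nondecreasing prefix sums for the largest prefix within the budget.
import Mathlib
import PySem

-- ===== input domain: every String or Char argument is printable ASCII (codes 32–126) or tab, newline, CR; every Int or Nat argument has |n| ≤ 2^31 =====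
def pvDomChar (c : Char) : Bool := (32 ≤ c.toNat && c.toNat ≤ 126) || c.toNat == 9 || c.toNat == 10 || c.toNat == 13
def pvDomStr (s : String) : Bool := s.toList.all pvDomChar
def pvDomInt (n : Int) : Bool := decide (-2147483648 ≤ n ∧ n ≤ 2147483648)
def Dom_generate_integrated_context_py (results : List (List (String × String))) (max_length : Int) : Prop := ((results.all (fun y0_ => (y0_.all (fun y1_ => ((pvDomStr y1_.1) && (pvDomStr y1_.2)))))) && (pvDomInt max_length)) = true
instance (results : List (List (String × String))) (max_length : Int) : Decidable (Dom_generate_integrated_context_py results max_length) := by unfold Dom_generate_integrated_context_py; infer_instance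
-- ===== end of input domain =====

-- B replaces A's greedy accumulate-and-break loop by prefix-length sums plus a binary search for the largest fitting prefix; same cost, different algorithm.


-- ===== PORT A =====
def pvALoop (max_length : Int) : List (List (String × String)) → List String → Int → List String
  | [], parts, _ => parts
  | r :: rest, parts, cur =>
    let content := PySem.Dict.getD ⟨r⟩ "content" ""
    let domain := PySem.Dict.getD ⟨r⟩ "domain" "unknown"
    let _source := PySem.Dict.getD ⟨r⟩ "source" "unknown"
    let context_part := "[" ++ PySem.Str.upper domain ++ "] " ++ PySem.Str.slice content none (some 300)
    if cur + PySem.Str.len context_part > max_length then parts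
    else pvALoop max_length rest (parts ++ [context_part]) (cur + PySem.Str.len context_part)

def generate_integrated_context_py (results : List (List (String × String))) (max_length : Int) : String :=
  PySem.Str.join "\n\n" (pvALoop max_length results [] 0)

-- ===== PORT B =====
def pvPartB (r : List (String × String)) : String :=
  "[" ++ PySem.Str.upper (PySem.Dict.getD ⟨r⟩ "domain" "unknown") ++ "] " ++
    PySem.Str.slice (PySem.Dict.getD ⟨r⟩ "content" "") none (some 300)

-- sums = [0]; for p in parts: sums.append(sums[-1] + len(p))
def pvSumsAux : List String → Int → List Int
  | [], _ => []
  | p :: ps, acc => (acc + PySem.Str.len p) :: pvSumsAux ps (acc + PySem.Str.len p)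

def pvSums (parts : List String) : List Int := 0 :: pvSumsAux parts 0

-- the while-loop: largest k in [lo,hi] with (k = 0 or sums[k] <= m); mid is always
-- in range of sums, so getD is exact for Python's sums[mid]
def pvBS (sums : List Int) (m : Int) (lo hi : Nat) : Nat :=
  if _h : lo < hi then
    -- mid = (lo + hi + 1) // 2, inlined
    if sums.getD ((lo + hi + 1) / 2) 0 ≤ m then pvBS sums m ((lo + hi + 1) / 2) hi
    else pvBS sums m lo ((lo + hi + 1) / 2 - 1)
  else lo
termination_by hi - lo
decreasing_by all_goals omega

def generate_integrated_context_py_alt (results : List (List (String × String))) (max_length : Int) : String :=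
  let parts := results.map pvPartB
  let sums := pvSums parts
  let lo := pvBS sums max_length 0 parts.length
  PySem.Str.join "\n\n" (parts.take lo)   -- parts[:lo], lo ≥ 0

-- ===== PRECONDITION & SPEC =====
def Spec_generate_integrated_context_py (results : List (List (String × String))) (max_length : Int) (out : String) : Prop := out = generate_integrated_context_py_alt results max_length
instance (results : List (List (String × String))) (max_length : Int) (out : String) : Decidable (Spec_generate_integrated_context_py results max_length out) := by unfold Spec_generate_integrated_context_py; infer_instance

-- ===== CLAIM (what is proved, stated in full; the proofs are below) =====
def Claim_equal_generate_integrated_context_py : Prop := ∀ (results : List (List (String × String))) (max_length : Int), Dom_generate_integrated_context_py results max_length → Spec_generate_integrated_context_py results max_length (generate_integrated_context_py results max_length)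

-- ===== LEMMAS AND PROOFS =====

-- total length of a list of parts
def pvSumLen (l : List String) : Int := l.foldr (fun p a => PySem.Str.len p + a) 0

-- the greedy cutoff A's loop computes (proof-only helper)
def pvCutoff (m : Int) : List String → Int → Nat
  | [], _ => 0
  | p :: ps, t =>
    if t + PySem.Str.len p > m then 0
    else pvCutoff m ps (t + PySem.Str.len p) + 1

lemma pvALoop_eq (m : Int) : ∀ (rs : List (List (String × String))) (parts : List String) (cur : Int),
    pvALoop m rs parts cur = parts ++ (rs.map pvPartB).take (pvCutoff m (rs.map pvPartB) cur) := by
  intro rs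
  induction rs with
  | nil => intro parts cur; simp [pvALoop, pvCutoff]
  | cons r rest ih =>
    intro parts cur
    simp only [pvALoop, pvPartB, List.map_cons, pvCutoff]
    split
    · simp
    · rw [ih, List.take_succ_cons]
      simp [List.append_assoc]

lemma pvStrLen_nonneg (s : String) : 0 ≤ PySem.Str.len s := by
  simp [PySem.Str.len_eq]

lemma pvSumLen_nonneg : ∀ (l : List String), 0 ≤ pvSumLen l
  | [] => le_refl 0
  | p :: ps => by
    have h1 := pvStrLen_nonneg p
    have h2 := pvSumLen_nonneg ps
    simp only [pvSumLen, List.foldr] at *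
    omega

lemma pvSumsAux_getD : ∀ (ps : List String) (acc : Int) (k : Nat), k < ps.length →
    (pvSumsAux ps acc).getD k 0 = acc + pvSumLen (ps.take (k + 1)) := by
  intro ps
  induction ps with
  | nil => intro acc k h; simp at h
  | cons p ps ih =>
    intro acc k h
    cases k with
    | zero => simp [pvSumsAux, pvSumLen]
    | succ k =>
      simp only [pvSumsAux, List.getD_cons_succ]
      rw [ih (acc + PySem.Str.len p) k (by simpa using h)]
      simp only [List.take_succ_cons, pvSumLen, List.foldr]
      ring

lemma pvSums_getD (parts : List String) (k : Nat) (h1 : 1 ≤ k) (h2 : k ≤ parts.length) :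
    (pvSums parts).getD k 0 = pvSumLen (parts.take k) := by
  obtain ⟨j, rfl⟩ : ∃ j, k = j + 1 := ⟨k - 1, by omega⟩
  simp only [pvSums, List.getD_cons_succ]
  rw [pvSumsAux_getD parts 0 j (by omega)]
  ring

-- characterisation of the greedy cutoff: all prefixes up to it fit, all longer prefixes overflow
lemma pvCutoff_spec (m : Int) : ∀ (ps : List String) (t : Int),
    pvCutoff m ps t ≤ ps.length ∧
    (∀ k, 1 ≤ k → k ≤ pvCutoff m ps t → t + pvSumLen (ps.take k) ≤ m) ∧
    (∀ k, pvCutoff m ps t < k → k ≤ ps.length → m < t + pvSumLen (ps.take k)) := by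
  intro ps
  induction ps with
  | nil =>
    intro t
    refine ⟨by simp [pvCutoff], ?_, ?_⟩ <;> intro k h1 h2 <;> simp [pvCutoff] at * <;> omega
  | cons p ps ih =>
    intro t
    simp only [pvCutoff]
    split
    · rename_i hbr
      refine ⟨by simp, ?_, ?_⟩
      · intro k h1 h2; omega
      · intro k h1 h2
        obtain ⟨j, rfl⟩ : ∃ j, k = j + 1 := ⟨k - 1, by omega⟩
        have hnn := pvSumLen_nonneg (ps.take j)
        simp only [List.take_succ_cons, pvSumLen, List.foldr] at *
        omega
    · rename_i hbr
      obtain ⟨hle, hfit, hov⟩ := ih (t + PySem.Str.len p)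
      refine ⟨by simp only [List.length_cons]; omega, ?_, ?_⟩
      · intro k h1 h2
        obtain ⟨j, rfl⟩ : ∃ j, k = j + 1 := ⟨k - 1, by omega⟩
        by_cases hj : 1 ≤ j
        · have := hfit j hj (by omega)
          simp only [List.take_succ_cons, pvSumLen, List.foldr] at *
          omega
        · have hj0 : j = 0 := by omega
          subst hj0
          simp only [List.take_succ_cons, List.take_zero, pvSumLen, List.foldr] at *
          omega
      · intro k h1 h2
        obtain ⟨j, rfl⟩ : ∃ j, k = j + 1 := ⟨k - 1, by omega⟩
        have := hov j (by omega) (by simpa using h2)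
        simp only [List.take_succ_cons, pvSumLen, List.foldr] at *
        omega

-- the binary search returns C when [1,C] all satisfy the test and (C,n] all fail it
lemma pvBS_eq (sums : List Int) (m : Int) (C n : Nat)
    (hQ : ∀ k, 1 ≤ k → k ≤ C → sums.getD k 0 ≤ m)
    (hN : ∀ k, C < k → k ≤ n → m < sums.getD k 0) :
    ∀ d lo hi, hi - lo ≤ d → lo ≤ C → C ≤ hi → hi ≤ n → pvBS sums m lo hi = C := by
  intro d
  induction d with
  | zero =>
    intro lo hi hd h1 h2 h3
    have : lo = hi := by omega
    subst this
    rw [pvBS]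
    simp; omega
  | succ d ih =>
    intro lo hi hd h1 h2 h3
    rw [pvBS]
    split
    · rename_i hlt
      have hmid1 : lo < (lo + hi + 1) / 2 := by omega
      have hmid2 : (lo + hi + 1) / 2 ≤ hi := by omega
      split
      · rename_i hle
        apply ih
        · omega
        · by_contra hc
          have := hN ((lo + hi + 1) / 2) (by omega) (by omega)
          omega
        · omega
        · omega
      · rename_i hgt
        apply ih
        · omega
        · omega
        · by_contra hc
          have := hQ ((lo + hi + 1) / 2) (by omega) (by omega)
          omega
        · omega
    · omega

-- ===== VERDICT (by name: the statement is the Claim_ definition above) =====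
theorem generate_integrated_context_py_spec : Claim_equal_generate_integrated_context_py := by
  intro results max_length _
  unfold Spec_generate_integrated_context_py generate_integrated_context_py generate_integrated_context_py_alt
  rw [pvALoop_eq]
  simp only [List.nil_append]
  congr 1
  congr 1
  obtain ⟨hle, hfit, hov⟩ := pvCutoff_spec max_length (results.map pvPartB) 0
  refine (pvBS_eq (pvSums (results.map pvPartB)) max_length (pvCutoff max_length (results.map pvPartB) 0) (results.map pvPartB).length ?_ ?_ (results.map pvPartB).length 0 (results.map pvPartB).length (by omega) (by omega) hle (le_refl _)).symm
  · intro k h1 h2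
    rw [pvSums_getD _ k h1 (by omega)]
    have := hfit k h1 h2
    omega
  · intro k h1 h2
    rw [pvSums_getD _ k (by omega) h2]
    have := hov k h1 h2
    omega
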